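-- pv_equiv track=rewrite | github.com/seungminleeee/AlgoStudy | jun/2025.02/250206_1541.잃어버린 괄호.py | solve
-- ===== SOURCE A (Python) =====
-- def solve(modify):
--     arr = []
--     change = ""
--     for i in range(len(modify)):
--         if modify[i] == "+":
--             arr.append(int(change))
--             arr.append("+")
--             change = ""
--         elif modify[i] == "-":
--             arr.append(int(change))
--             arr.append("-")
--             change = ""
--         elif i == len(modify) - 1:
--             change += modify[i]
--             arr.append(int(change))
--         else:
--             change += modify[i]
--
--     ans = arr[0]
--     negative = False
--     for i in range(1, len(arr), 2):
--         operator = arr[i]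
--         num = arr[i + 1]
--
--         if operator == "-": negative = True
--         if negative: ans -= num
--         else: ans += num
--
--     return ans
-- ===== SOURCE B (Python) =====
-- def solve(modify):
--     groups = modify.split('-')
--     sums = [sum(int(tok) for tok in g.split('+')) for g in groups]
--     return sums[0] - sum(sums[1:])
-- ===== Notes on version B (the rewrite author's own statement) =====
-- stated objective: idiomatic
-- what changed: Replaces the token-array-plus-sticky-negative-flag state machine (two passes over an explicit list of ints and operator strings) with group-wise string splitting: split on '-', sum each group's '+'-separated integers, and return the first group's sum minus the sums of the rest.
import Mathlib
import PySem

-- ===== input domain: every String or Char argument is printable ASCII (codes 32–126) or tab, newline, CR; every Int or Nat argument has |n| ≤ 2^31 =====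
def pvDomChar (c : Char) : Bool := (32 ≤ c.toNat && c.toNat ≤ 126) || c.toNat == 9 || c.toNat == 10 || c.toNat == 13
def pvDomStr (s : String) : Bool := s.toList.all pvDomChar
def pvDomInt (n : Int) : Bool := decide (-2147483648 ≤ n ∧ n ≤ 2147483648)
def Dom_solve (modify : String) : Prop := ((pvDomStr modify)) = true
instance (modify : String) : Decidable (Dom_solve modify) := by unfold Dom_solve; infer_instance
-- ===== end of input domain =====

-- B replaces A's token-array-plus-sticky-negative-flag state machine by group-wise splitting
-- (split on '-', sum each group's '+'-separated ints, subtract later group sums); same cost, more idiomatic.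

-- ===== PORT A =====
-- Python's arr mixes ints and the operator strings "+"/"-".
inductive PyTok where
  | num (n : Int)
  | str (s : String)
deriving DecidableEq, Repr

-- Python reads arr[0] / arr[i+1] as an int; on inputs admitted by Pre_solve these are always
-- `num` cells.  (The `str` case is unreachable there; 0 is a don't-care value.)
def pyTokInt : PyTok → Int
  | .num n => n
  | .str _ => 0

-- the first for-loop: state (arr, change); `i == len(modify) - 1` is `rest = []`
def solveLoop1 : List Char → List PyTok → List Char → List PyTok
  | [], arr, _ => arr
  | c :: rest, arr, change =>
    if c = '+' then
      solveLoop1 rest (arr ++ [.num ((PySem.Int.ofChars? change).getD 0), .str "+"]) []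
    else if c = '-' then
      solveLoop1 rest (arr ++ [.num ((PySem.Int.ofChars? change).getD 0), .str "-"]) []
    else if rest = [] then
      arr ++ [.num ((PySem.Int.ofChars? (change ++ [c])).getD 0)]
    else
      solveLoop1 rest arr (change ++ [c])

-- the second for-loop `for i in range(1, len(arr), 2)`: walk the tail of arr two cells at a time;
-- a missing arr[i+1] (Python IndexError, excluded by Pre_solve) is read through getD as num 0
def solveLoop2 : List PyTok → Int → Bool → Int
  | [], ans, _ => ans
  | [operator], ans, negative =>
    let negative := if operator = .str "-" then true else negative
    let num := pyTokInt ((PySem.List.pyGet? ([] : List PyTok) 0).getD (.num 0))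
    if negative then ans - num else ans + num
  | operator :: numTok :: rest, ans, negative =>
    let negative := if operator = .str "-" then true else negative
    let num := pyTokInt numTok
    solveLoop2 rest (if negative then ans - num else ans + num) negative

def solve (modify : String) : Int :=
  let arr := solveLoop1 modify.toList [] []
  -- ans = arr[0]  (IndexError on empty arr is excluded by Pre_solve)
  let ans := pyTokInt ((PySem.List.pyGet? arr 0).getD (.num 0))
  solveLoop2 (arr.drop 1) ans false

-- ===== PORT B =====
def bGroupSum (g : List Char) : Int :=
  ((PySem.Chars.splitOn g ['+']).map (fun tok => (PySem.Int.ofChars? tok).getD 0)).sum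

def solve_alt (modify : String) : Int :=
  match PySem.Chars.splitOn modify.toList ['-'] with
  | [] => 0            -- unreachable: str.split never returns an empty list
  | g :: gs => bGroupSum g - (gs.map bGroupSum).sum

-- ===== PRECONDITION & SPEC =====
-- Exactly the inputs on which Python A returns: every maximal operator-free segment of the string
-- parses as a Python int (otherwise A raises ValueError, or IndexError on an empty string /
-- trailing operator, whose final segment is empty and unparsable).
def Pre_solve (modify : String) : Prop :=
  ∀ t ∈ modify.toList.splitOnP (fun c => c == '+' || c == '-'),
    (PySem.Int.ofChars? t).isSome = true
instance (modify : String) : Decidable (Pre_solve modify) := by unfold Pre_solve; infer_instance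

def pvWitness_solve : String := "55-10+20"

def Spec_solve (modify : String) (out : Int) : Prop := out = solve_alt modify
instance (modify : String) (out : Int) : Decidable (Spec_solve modify out) := by unfold Spec_solve; infer_instance

-- ===== CLAIM (what is proved, stated in full; the proofs are below) =====
def Claim_equal_solve : Prop := ∀ (modify : String), Dom_solve modify → Pre_solve modify → Spec_solve modify (solve modify)

-- ===== LEMMAS AND PROOFS =====


-- PySem's str.split with a single-character separator is Mathlib's splitOnP
theorem pvSplitOn_go (c : Char) (l cur : List Char) (acc : List (List Char)) (fuel : Nat) (h : l.length < fuel) :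
    PySem.Chars.splitOn.go [c] fuel l cur acc
      = acc.reverse ++ List.modifyHead (cur.reverse ++ ·) (l.splitOnP (· == c)) := by
  induction l generalizing fuel cur acc with
  | nil =>
    cases fuel with
    | zero => omega
    | succ f => rw [PySem.Chars.splitOn.go.eq_2 _ _ _ _ (by omega)]; simp [List.splitOnP_nil]
  | cons c' rest ih =>
    cases fuel with
    | zero => omega
    | succ f =>
      rw [PySem.Chars.splitOn.go.eq_3]
      by_cases hc : c' = c
      · subst hc
        have hpre : List.isPrefixOf [c'] (c' :: rest) = true := by
          simp [List.isPrefixOf]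
        rw [if_pos hpre]
        simp only [List.length_cons, List.length_nil, List.drop_succ_cons, List.drop_zero]
        rw [ih [] (cur.reverse :: acc) f (by simp at h; omega)]
        rw [List.splitOnP_cons]
        simp only [beq_self_eq_true, if_true, List.reverse_cons, List.append_assoc,
          List.reverse_nil, List.nil_append, List.modifyHead_cons]
        cases hs : List.splitOnP (fun x => x == c') rest <;> simp
      · have hpre : List.isPrefixOf [c] (c' :: rest) = false := by
          simp [List.isPrefixOf]
          intro hh; exact hc hh.symm
        rw [if_neg (by simp [hpre])]
        rw [ih (c' :: cur) acc f (by simp at h; omega)]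
        rw [List.splitOnP_cons]
        have : ((c' : Char) == c) = false := by simp [hc]
        rw [this]
        simp only [Bool.false_eq_true, if_false]
        rw [List.modifyHead_modifyHead]
        have hf : ((fun x => cur.reverse ++ x) ∘ List.cons c')
            = fun x => (c' :: cur).reverse ++ x := by
          funext x; simp
        rw [hf]

theorem pvSplitOn_single (cs : List Char) (c : Char) :
    PySem.Chars.splitOn cs [c] = cs.splitOnP (· == c) := by
  unfold PySem.Chars.splitOn
  rw [pvSplitOn_go c cs [] [] (cs.length + 1) (by omega)]
  cases hs : cs.splitOnP (· == c) <;> simp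

-- ---- proof-side abbreviations ----
def pvIsOp (c : Char) : Bool := c == '+' || c == '-'

def pvArr (cs : List Char) : List PyTok := solveLoop1 cs [] []

def pvPairSum : List PyTok → Int
  | [] => 0
  | [_] => 0
  | _ :: y :: t => pyTokInt y + pvPairSum t

def pvSumA (cs : List Char) : Int :=
  match pvArr cs with
  | [] => 0
  | x :: t => pyTokInt x + pvPairSum t

def pvSolveA (cs : List Char) : Int :=
  solveLoop2 ((pvArr cs).drop 1) (pyTokInt ((PySem.List.pyGet? (pvArr cs) 0).getD (.num 0))) false

def pvSolveB (cs : List Char) : Int :=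
  match cs.splitOnP (· == '-') with
  | [] => 0
  | g :: gs => bGroupSum g - (gs.map bGroupSum).sum

def pvTotB (cs : List Char) : Int := ((cs.splitOnP (· == '-')).map bGroupSum).sum

theorem pvSolveA_eq (modify : String) : solve modify = pvSolveA modify.toList := rfl

theorem pvSolveB_eq (modify : String) : solve_alt modify = pvSolveB modify.toList := by
  unfold solve_alt pvSolveB
  rw [pvSplitOn_single]

-- ---- the first loop builds the token array segment by segment ----
theorem pvLoop1_acc (cs : List Char) : ∀ (arr : List PyTok) (change : List Char),
    solveLoop1 cs arr change = arr ++ solveLoop1 cs [] change := by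
  induction cs with
  | nil => intro arr change; simp [solveLoop1]
  | cons c rest ih =>
    intro arr change
    by_cases h1 : c = '+'
    · simp only [solveLoop1, if_pos h1]
      rw [ih (arr ++ _), ih ([] ++ _)]
      simp
    · by_cases h2 : c = '-'
      · simp only [solveLoop1, if_neg h1, if_pos h2]
        rw [ih (arr ++ _), ih ([] ++ _)]
        simp
      · by_cases h3 : rest = []
        · simp [solveLoop1, if_neg h1, if_neg h2, if_pos h3]
        · simp only [solveLoop1, if_neg h1, if_neg h2, if_neg h3]
          rw [ih arr, ih []]

theorem pvLoop1_nosep (seg : List Char) (h : ∀ c ∈ seg, pvIsOp c = false) :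
    ∀ change : List Char, seg ≠ [] →
      solveLoop1 seg [] change = [.num ((PySem.Int.ofChars? (change ++ seg)).getD 0)] := by
  induction seg with
  | nil => intro _ hne; exact absurd rfl hne
  | cons c rest ih =>
    intro change _
    have hc : pvIsOp c = false := h c (by simp)
    have h1 : ¬ c = '+' := by intro hh; rw [hh] at hc; simp [pvIsOp] at hc
    have h2 : ¬ c = '-' := by intro hh; rw [hh] at hc; simp [pvIsOp] at hc
    cases hr : rest with
    | nil => simp [solveLoop1, if_neg h1, if_neg h2]
    | cons c2 r2 =>
      rw [solveLoop1]
      rw [if_neg h1, if_neg h2, if_neg (by simp)]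
      rw [← hr, ih (fun x hx => h x (by simp [hx])) (change ++ [c]) (by simp [hr])]
      simp

theorem pvLoop1_sep (seg : List Char) (h : ∀ x ∈ seg, pvIsOp x = false) (c : Char)
    (hc : pvIsOp c = true) (rest change : List Char) :
    solveLoop1 (seg ++ c :: rest) [] change
      = .num ((PySem.Int.ofChars? (change ++ seg)).getD 0)
        :: .str (if c = '+' then "+" else "-") :: solveLoop1 rest [] [] := by
  induction seg generalizing change with
  | nil =>
    by_cases h1 : c = '+'
    · simp only [List.nil_append, solveLoop1, if_pos h1]
      rw [pvLoop1_acc]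
      simp
    · have h2 : c = '-' := by simp [pvIsOp, h1] at hc; exact hc
      simp only [List.nil_append, solveLoop1, if_neg h1, if_pos h2]
      rw [pvLoop1_acc]
      simp
  | cons c0 seg' ih =>
    have hc0 : pvIsOp c0 = false := h c0 (by simp)
    have h1 : ¬ c0 = '+' := by intro hh; rw [hh] at hc0; simp [pvIsOp] at hc0
    have h2 : ¬ c0 = '-' := by intro hh; rw [hh] at hc0; simp [pvIsOp] at hc0
    rw [List.cons_append, solveLoop1]
    rw [if_neg h1, if_neg h2, if_neg (by simp)]
    rw [ih (fun x hx => h x (by simp [hx])) (change ++ [c0])]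
    simp

-- ---- the second loop ----
theorem pvLoop2_shift : ∀ (t : List PyTok) (a b : Int) (neg : Bool),
    solveLoop2 t (a + b) neg = b + solveLoop2 t a neg
  | [], a, b, neg => by simp [solveLoop2]; ring
  | [o], a, b, neg => by
    simp only [solveLoop2]
    generalize (if o = PyTok.str "-" then true else neg) = neg'
    cases neg' <;> simp [pyTokInt, PySem.List.pyGet?] <;> ring
  | o :: n :: t, a, b, neg => by
    simp only [solveLoop2]
    generalize (if o = PyTok.str "-" then true else neg) = neg'
    cases neg'
    · rw [show a + b + pyTokInt n = a + pyTokInt n + b by ring]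
      simpa using pvLoop2_shift t (a + pyTokInt n) b false
    · rw [show a + b - pyTokInt n = a - pyTokInt n + b by ring]
      simpa using pvLoop2_shift t (a - pyTokInt n) b true

theorem pvLoop2_true : ∀ (t : List PyTok) (a : Int),
    solveLoop2 t a true = a - pvPairSum t
  | [], a => by simp [solveLoop2, pvPairSum]
  | [o], a => by simp [solveLoop2, pvPairSum, pyTokInt, PySem.List.pyGet?]
  | o :: n :: t, a => by
    simp only [solveLoop2, pvPairSum, ite_self]
    rw [pvLoop2_true t]
    simp
    omega

-- ---- splitting lemmas for B ----
theorem pvSplitOnP_prefix (p : Char → Bool) (seg l : List Char)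
    (h : ∀ c ∈ seg, p c = false) :
    (seg ++ l).splitOnP p = List.modifyHead (seg ++ ·) (l.splitOnP p) := by
  induction seg with
  | nil => cases hs : l.splitOnP p <;> simp [hs]
  | cons c0 seg' ih =>
    rw [List.cons_append, List.splitOnP_cons]
    rw [if_neg (by simp [h c0 (by simp)])]
    rw [ih (fun x hx => h x (by simp [hx])), List.modifyHead_modifyHead]
    congr 1

theorem pvGroupSum_nosep (g : List Char) (h : ∀ c ∈ g, pvIsOp c = false) :
    bGroupSum g = (PySem.Int.ofChars? g).getD 0 := by
  unfold bGroupSum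
  rw [pvSplitOn_single, List.splitOnP_eq_single _ _ (by
    intro x hx
    have := h x hx
    simp [pvIsOp] at this
    simp [this.1])]
  simp

theorem pvGroupSum_plus (seg g : List Char) (h : ∀ c ∈ seg, pvIsOp c = false) :
    bGroupSum (seg ++ '+' :: g) = (PySem.Int.ofChars? seg).getD 0 + bGroupSum g := by
  unfold bGroupSum
  rw [pvSplitOn_single, pvSplitOn_single, List.splitOnP_first _ _ (by
      intro x hx
      have := h x hx
      simp [pvIsOp] at this
      simp [this.1]) '+' (by simp) g]
  simp

-- ---- first-operator decomposition ----
theorem pvDecomp (cs : List Char) :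
    (∀ c ∈ cs, pvIsOp c = false) ∨
      ∃ seg c rest, cs = seg ++ c :: rest ∧ (∀ x ∈ seg, pvIsOp x = false) ∧
        pvIsOp c = true ∧ rest.length < cs.length := by
  cases hd : cs.dropWhile (fun c => !pvIsOp c) with
  | nil =>
    left
    intro c hcmem
    have := (List.dropWhile_eq_nil_iff.mp hd) c hcmem
    simpa using this
  | cons c rest =>
    right
    refine ⟨cs.takeWhile (fun c => !pvIsOp c), c, rest, ?_, ?_, ?_, ?_⟩
    · conv_lhs => rw [← List.takeWhile_append_dropWhile (p := fun c => !pvIsOp c) (l := cs)]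
      rw [hd]
    · intro x hx
      have := List.mem_takeWhile_imp hx
      simpa using this
    · have hh := List.head?_dropWhile_not (fun c => !pvIsOp c) cs
      rw [hd] at hh
      simpa using hh
    · conv_rhs => rw [← List.takeWhile_append_dropWhile (p := fun c => !pvIsOp c) (l := cs)]
      rw [hd]
      simp
      omega

-- ---- shapes and step equations ----
theorem pvArr_shape (cs : List Char) (h : cs ≠ []) :
    ∃ v t, pvArr cs = .num v :: t := by
  rcases pvDecomp cs with hfree | ⟨seg, c, rest, hcs, hseg, hc, _⟩
  · exact ⟨_, _, by unfold pvArr; rw [pvLoop1_nosep cs hfree [] h]⟩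
  · subst hcs
    exact ⟨_, _, by unfold pvArr; rw [pvLoop1_sep seg hseg c hc rest []]⟩

theorem pvHead_eval (v : Int) (t : List PyTok) :
    pyTokInt ((PySem.List.pyGet? (PyTok.num v :: t) 0).getD (.num 0)) = v := by
  simp [PySem.List.pyGet?, PySem.List.pyIdx?, pyTokInt]

theorem pvBaseA (cs : List Char) (hfree : ∀ c ∈ cs, pvIsOp c = false) (h : cs ≠ []) :
    pvSolveA cs = (PySem.Int.ofChars? cs).getD 0 := by
  unfold pvSolveA
  rw [show pvArr cs = [.num ((PySem.Int.ofChars? ([] ++ cs)).getD 0)] from by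
    unfold pvArr; rw [pvLoop1_nosep cs hfree [] h]]
  simp only [List.nil_append, List.drop_succ_cons, List.drop_zero, pvHead_eval]
  rfl

theorem pvBaseB (cs : List Char) (hfree : ∀ c ∈ cs, pvIsOp c = false) :
    pvSolveB cs = (PySem.Int.ofChars? cs).getD 0 := by
  unfold pvSolveB
  rw [List.splitOnP_eq_single _ _ (by
    intro x hx
    have := hfree x hx
    simp [pvIsOp] at this
    simp [this.2])]
  simp [pvGroupSum_nosep cs hfree]

theorem pvBaseSumA (cs : List Char) (hfree : ∀ c ∈ cs, pvIsOp c = false) (h : cs ≠ []) :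
    pvSumA cs = (PySem.Int.ofChars? cs).getD 0 := by
  unfold pvSumA
  rw [show pvArr cs = [.num ((PySem.Int.ofChars? ([] ++ cs)).getD 0)] from by
    unfold pvArr; rw [pvLoop1_nosep cs hfree [] h]]
  simp [pyTokInt, pvPairSum]

theorem pvBaseTotB (cs : List Char) (hfree : ∀ c ∈ cs, pvIsOp c = false) :
    pvTotB cs = (PySem.Int.ofChars? cs).getD 0 := by
  unfold pvTotB
  rw [List.splitOnP_eq_single _ _ (by
    intro x hx
    have := hfree x hx
    simp [pvIsOp] at this
    simp [this.2])]
  simp [pvGroupSum_nosep cs hfree]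

theorem pvStepA (seg : List Char) (hseg : ∀ x ∈ seg, pvIsOp x = false) (c : Char)
    (hc : pvIsOp c = true) (rest : List Char) :
    pvSolveA (seg ++ c :: rest)
      = if c = '+' then (PySem.Int.ofChars? seg).getD 0 + pvSolveA rest
        else (PySem.Int.ofChars? seg).getD 0 - pvSumA rest := by
  unfold pvSolveA
  rw [show pvArr (seg ++ c :: rest)
        = .num ((PySem.Int.ofChars? ([] ++ seg)).getD 0)
          :: .str (if c = '+' then "+" else "-") :: pvArr rest from by
    unfold pvArr; rw [pvLoop1_sep seg hseg c hc rest []]]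
  simp only [List.nil_append, List.drop_succ_cons, List.drop_zero, pvHead_eval]
  by_cases hrest : rest = []
  · subst hrest
    by_cases hplus : c = '+' <;>
      simp [hplus, solveLoop2, pyTokInt, PySem.List.pyGet?, PySem.List.pyIdx?, pvArr,
        solveLoop1, pvSumA]
  · obtain ⟨v1, t, ht⟩ := pvArr_shape rest hrest
    rw [ht]
    have hAr : pvSolveA rest = solveLoop2 t v1 false := by
      unfold pvSolveA
      rw [ht]
      simp only [List.drop_succ_cons, List.drop_zero, pvHead_eval]
    have hSr : pvSumA rest = v1 + pvPairSum t := by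
      unfold pvSumA; rw [ht]; rfl
    by_cases hplus : c = '+'
    · rw [if_pos hplus]
      subst hplus
      simp only [solveLoop2, List.drop_succ_cons, List.drop_zero, pvHead_eval]
      rw [if_neg (show ¬ (PyTok.str "+" = PyTok.str "-") by decide)]
      simp only [Bool.false_eq_true, if_false, pyTokInt]
      rw [show (PySem.Int.ofChars? seg).getD 0 + v1 = v1 + (PySem.Int.ofChars? seg).getD 0 by ring]
      rw [pvLoop2_shift t v1 ((PySem.Int.ofChars? seg).getD 0) false]
      simp
    · have hm : c = '-' := by simp [pvIsOp, hplus] at hc; exact hc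
      rw [if_neg hplus]
      subst hm
      rw [hSr]
      simp only [if_neg (show ¬ ('-' = '+') by decide), solveLoop2]
      simp only [if_true, pyTokInt]
      rw [pvLoop2_true t]
      ring

theorem pvStepSumA (seg : List Char) (hseg : ∀ x ∈ seg, pvIsOp x = false) (c : Char)
    (hc : pvIsOp c = true) (rest : List Char) :
    pvSumA (seg ++ c :: rest) = (PySem.Int.ofChars? seg).getD 0 + pvSumA rest := by
  unfold pvSumA
  rw [show pvArr (seg ++ c :: rest)
        = .num ((PySem.Int.ofChars? ([] ++ seg)).getD 0)
          :: .str (if c = '+' then "+" else "-") :: pvArr rest from by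
    unfold pvArr; rw [pvLoop1_sep seg hseg c hc rest []]]
  by_cases hrest : rest = []
  · subst hrest
    simp [pvArr, solveLoop1, pvPairSum, pyTokInt]
  · obtain ⟨v1, t, ht⟩ := pvArr_shape rest hrest
    rw [ht]
    simp [pvPairSum, pyTokInt]

theorem pvStepB (seg : List Char) (hseg : ∀ x ∈ seg, pvIsOp x = false) (c : Char)
    (hc : pvIsOp c = true) (rest : List Char) :
    pvSolveB (seg ++ c :: rest)
      = if c = '+' then (PySem.Int.ofChars? seg).getD 0 + pvSolveB rest
        else (PySem.Int.ofChars? seg).getD 0 - pvTotB rest := by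
  have hsegm : ∀ x ∈ seg, ¬ ((fun c => c == '-') x = true) := by
    intro x hx
    have := hseg x hx
    simp [pvIsOp] at this
    simp [this.2]
  by_cases hplus : c = '+'
  · subst hplus
    rw [if_pos rfl]
    unfold pvSolveB
    rw [show seg ++ '+' :: rest = (seg ++ ['+']) ++ rest by simp]
    rw [pvSplitOnP_prefix _ _ rest (by
      intro x hx
      rcases List.mem_append.mp hx with hx1 | hx1
      · have := hseg x hx1; simp [pvIsOp] at this; simp [this.2]
      · simp at hx1; simp [hx1])]
    cases hs : rest.splitOnP (· == '-') with
    | nil => exact absurd hs (List.splitOnP_ne_nil _ _)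
    | cons g0 gs =>
      simp only [List.modifyHead_cons]
      rw [show (seg ++ ['+']) ++ g0 = seg ++ '+' :: g0 by simp]
      rw [pvGroupSum_plus seg g0 hseg]
      ring
  · have hminus : c = '-' := by simp [pvIsOp, hplus] at hc; exact hc
    subst hminus
    rw [if_neg (by simp)]
    unfold pvSolveB pvTotB
    rw [List.splitOnP_first _ _ hsegm '-' (by simp) rest]
    show bGroupSum seg - (List.map bGroupSum (rest.splitOnP (· == '-'))).sum = _
    rw [pvGroupSum_nosep seg hseg]

theorem pvStepTotB (seg : List Char) (hseg : ∀ x ∈ seg, pvIsOp x = false) (c : Char)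
    (hc : pvIsOp c = true) (rest : List Char) :
    pvTotB (seg ++ c :: rest) = (PySem.Int.ofChars? seg).getD 0 + pvTotB rest := by
  by_cases hplus : c = '+'
  · subst hplus
    unfold pvTotB
    rw [show seg ++ '+' :: rest = (seg ++ ['+']) ++ rest by simp]
    rw [pvSplitOnP_prefix _ _ rest (by
      intro x hx
      rcases List.mem_append.mp hx with hx1 | hx1
      · have := hseg x hx1; simp [pvIsOp] at this; simp [this.2]
      · simp at hx1; simp [hx1])]
    cases hs : rest.splitOnP (· == '-') with
    | nil => exact absurd hs (List.splitOnP_ne_nil _ _)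
    | cons g0 gs =>
      simp only [List.modifyHead_cons, List.map_cons, List.sum_cons]
      rw [show (seg ++ ['+']) ++ g0 = seg ++ '+' :: g0 by simp]
      rw [pvGroupSum_plus seg g0 hseg]
      ring
  · have hminus : c = '-' := by simp [pvIsOp, hplus] at hc; exact hc
    subst hminus
    unfold pvTotB
    rw [List.splitOnP_first _ _ (by
      intro x hx
      have := hseg x hx
      simp [pvIsOp] at this
      simp [this.2]) '-' (by simp) rest]
    rw [List.map_cons, List.sum_cons, pvGroupSum_nosep seg hseg]

-- ---- the main induction ----
theorem pvMain : ∀ (n : Nat) (cs : List Char), cs.length ≤ n →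
    pvSolveA cs = pvSolveB cs ∧ pvSumA cs = pvTotB cs := by
  intro n
  induction n with
  | zero =>
    intro cs hlen
    have : cs = [] := by
      cases cs with
      | nil => rfl
      | cons a b => simp at hlen
    subst this
    constructor <;> decide
  | succ m ih =>
    intro cs hlen
    rcases pvDecomp cs with hfree | ⟨seg, c, rest, hcs, hseg, hc, hlt⟩
    · by_cases hcs : cs = []
      · subst hcs; constructor <;> decide
      · rw [pvBaseA cs hfree hcs, pvBaseB cs hfree, pvBaseSumA cs hfree hcs, pvBaseTotB cs hfree]
        exact ⟨rfl, rfl⟩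
    · subst hcs
      have hrlen : rest.length ≤ m := by
        simp at hlen
        omega
      obtain ⟨ihA, ihS⟩ := ih rest hrlen
      rw [pvStepA seg hseg c hc rest, pvStepSumA seg hseg c hc rest,
        pvStepB seg hseg c hc rest, pvStepTotB seg hseg c hc rest, ihA, ihS]
      constructor
      · rfl
      · rfl

theorem solve_spec : Claim_equal_solve := by
  intro modify _ _
  unfold Spec_solve
  rw [pvSolveA_eq, pvSolveB_eq]
  exact (pvMain modify.toList.length modify.toList le_rfl).1
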